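-- pv_equiv track=rewrite | github.com/luisfe12/Seguirdad | lab_1/del_1_al_4.py | convertir_mayusculas
-- ===== SOURCE A (Python) =====
-- def convertir_mayusculas(poema):
--     mayusculas_todo = ''
--     for i in range(len(poema)):
--
--         valor = ord(poema[i])
--
--         if valor >= 65 and valor <= 90:
--             p_ = chr(valor)
--             mayusculas_todo=mayusculas_todo+p_
--             continue
--
--         elif valor < 97 or valor > 122:
--             continue
--         valor = valor - 32
--         p = chr(valor)
--         mayusculas_todo =mayusculas_todo + p
--     return mayusculas_todo
-- ===== SOURCE B (Python) =====
-- # Precomputed str.translate table: each byte maps to its uppercase ordinal,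
-- # to itself, or to None (deleted); the translation is one table-driven bulk call.
-- _TABLA = {i: (i - 32 if 97 <= i <= 122 else (i if 65 <= i <= 90 else None))
--           for i in range(256)}
--
--
-- def convertir_mayusculas(poema):
--     return poema.translate(_TABLA)
-- ===== Notes on version B (the rewrite author's own statement) =====
-- stated objective: faster
-- what changed: Replaces A's per-character ord-range branching with quadratic string concatenation by a precomputed 256-entry translation table (ord -> uppercase ord / itself / delete) applied with one bulk str.translate call.
import Mathlib
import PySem

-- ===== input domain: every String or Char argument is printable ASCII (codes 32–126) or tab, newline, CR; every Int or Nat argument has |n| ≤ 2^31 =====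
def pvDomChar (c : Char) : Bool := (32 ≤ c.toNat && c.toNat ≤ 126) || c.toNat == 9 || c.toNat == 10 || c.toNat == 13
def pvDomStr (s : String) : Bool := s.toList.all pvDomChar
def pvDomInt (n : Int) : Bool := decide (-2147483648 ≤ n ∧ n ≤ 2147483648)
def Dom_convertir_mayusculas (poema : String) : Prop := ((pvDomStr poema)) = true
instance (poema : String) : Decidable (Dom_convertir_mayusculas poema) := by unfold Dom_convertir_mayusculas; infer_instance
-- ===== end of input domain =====

-- B replaces A's per-character ord-range branching with accumulation by a precomputed
-- 256-entry translation table applied through one table-driven pass (str.translate).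

-- ===== PORT A =====
-- literal port of A: index loop over the string, per-character ord branches, string accumulation
def convertir_mayusculas (poema : String) : String :=
  poema.toList.foldl (fun mayusculas_todo c =>
    let valor := c.toNat
    if 65 ≤ valor ∧ valor ≤ 90 then
      mayusculas_todo ++ String.ofList [Char.ofNat valor]
    else if valor < 97 ∨ 122 < valor then
      mayusculas_todo
    else
      mayusculas_todo ++ String.ofList [Char.ofNat (valor - 32)]) ""

-- ===== PORT B =====
-- the dict comprehension _TABLA: ord of every byte 0..255 ↦ uppercase ord / itself / None (= delete)
def pvTabla : PySem.Dict Int (Option Int) :=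
  (PySem.List.pyRange 0 256 1).foldl
    (fun d i => d.insert i (if 97 ≤ i ∧ i ≤ 122 then some (i - 32)
                            else if 65 ≤ i ∧ i ≤ 90 then some i else none))
    PySem.Dict.empty

-- str.translate, ported by hand (no PySem primitive): each character's ordinal is looked up
-- in the table; a missing key keeps the character, 'some none' (None) deletes it,
-- 'some (some v)' replaces it by chr(v). Exact for tables whose values are ints or None.
def convertir_mayusculas_alt (poema : String) : String :=
  String.ofList (poema.toList.flatMap (fun c =>
    match pvTabla.get? (c.toNat : Int) with
    | none => [c]
    | some none => []
    | some (some v) => [Char.ofNat v.toNat]))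

-- ===== PRECONDITION & SPEC =====
def Spec_convertir_mayusculas (poema : String) (out : String) : Prop := out = convertir_mayusculas_alt poema
instance (poema : String) (out : String) : Decidable (Spec_convertir_mayusculas poema out) := by unfold Spec_convertir_mayusculas; infer_instance

-- ===== CLAIM (what is proved, stated in full; the proofs are below) =====
def Claim_equal_convertir_mayusculas : Prop := ∀ (poema : String), Dom_convertir_mayusculas poema → Spec_convertir_mayusculas poema (convertir_mayusculas poema)

-- ===== LEMMAS AND PROOFS =====

-- a fold of inserts whose value depends only on the key: lookup = membership test
theorem pv_get?_foldl_insert (l : List Int) (f : Int → Option Int) :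
    ∀ (d : PySem.Dict Int (Option Int)) (k : Int),
      (l.foldl (fun d i => d.insert i (f i)) d).get? k
        = if k ∈ l then some (f k) else d.get? k := by
  induction l with
  | nil => intro d k; simp
  | cons a t ih =>
    intro d k
    simp only [List.foldl_cons, ih, List.mem_cons]
    by_cases ht : k ∈ t
    · simp [ht]
    · rw [if_neg (by simp [ht]), PySem.Dict.get?_insert]
      by_cases ha : k = a
      · simp [ha]
      · simp [ha, ht]

theorem pv_tabla_get (k : Int) (h0 : 0 ≤ k) (h1 : k < 256) :
    pvTabla.get? k = some (if 97 ≤ k ∧ k ≤ 122 then some (k - 32)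
                           else if 65 ≤ k ∧ k ≤ 90 then some k else none) := by
  unfold pvTabla
  rw [pv_get?_foldl_insert]
  rw [if_pos (by rw [PySem.List.mem_pyRange_one]; omega)]

theorem pv_fold_eq (l : List Char) (h : ∀ c ∈ l, pvDomChar c = true) : ∀ (acc : String),
    (l.foldl (fun mayusculas_todo c =>
      let valor := c.toNat
      if 65 ≤ valor ∧ valor ≤ 90 then
        mayusculas_todo ++ String.ofList [Char.ofNat valor]
      else if valor < 97 ∨ 122 < valor then
        mayusculas_todo
      else
        mayusculas_todo ++ String.ofList [Char.ofNat (valor - 32)]) acc).toList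
    = acc.toList ++ l.flatMap (fun c =>
        match pvTabla.get? (c.toNat : Int) with
        | none => [c]
        | some none => []
        | some (some v) => [Char.ofNat v.toNat]) := by
  induction l with
  | nil => intro acc; simp
  | cons c t ih =>
    intro acc
    have hc : pvDomChar c = true := h c (List.mem_cons_self ..)
    have hlt : c.toNat < 256 := by
      simp only [pvDomChar, Bool.or_eq_true, Bool.and_eq_true, decide_eq_true_eq,
        beq_iff_eq] at hc
      omega
    have ht : ∀ x ∈ t, pvDomChar x = true := fun x hx => h x (List.mem_cons_of_mem _ hx)
    have htab := pv_tabla_get (c.toNat : Int) (by positivity) (by exact_mod_cast hlt)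
    simp only [List.foldl_cons, List.flatMap_cons, ih ht, htab]
    by_cases h1 : 65 ≤ c.toNat ∧ c.toNat ≤ 90
    · rw [if_pos h1,
        if_neg (by omega), if_pos (by omega)]
      simp [Char.ofNat_toNat]
    · by_cases h2 : c.toNat < 97 ∨ 122 < c.toNat
      · rw [if_neg h1, if_pos h2,
          if_neg (by omega), if_neg (by omega)]
        simp
      · rw [if_neg h1, if_neg h2, if_pos (by omega)]
      -- lower-case letter: both sides append chr(ord c − 32)
        have hv : ((c.toNat : Int) - 32).toNat = c.toNat - 32 := by omega
        simp [hv]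

-- ===== VERDICT (by name: the statement is the Claim_ definition above) =====
theorem convertir_mayusculas_spec : Claim_equal_convertir_mayusculas := by
  intro poema hdom
  unfold Spec_convertir_mayusculas convertir_mayusculas convertir_mayusculas_alt
  apply String.ext
  rw [pv_fold_eq]
  · simp
  · intro c hcmem
    have := hdom
    unfold Dom_convertir_mayusculas pvDomStr at this
    exact List.all_eq_true.mp this c hcmem
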